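-- pv_equiv track=rewrite | github.com/delk73/precision-signal | scripts/artifact_diff.py | classify_sample_diffs
-- ===== SOURCE A (Python) =====
-- from typing import Optional
--
-- TRANSIENT_WINDOW_FRAMES = 8
--
-- def classify_sample_diffs(sample_diffs: list[int]) -> Optional[str]:
--     # Transient requires reconvergence within K frames and sustained equality
--     # through the remainder of the transient window.
--     transient_window_end = min(len(sample_diffs) - 1, TRANSIENT_WINDOW_FRAMES)
--     for rel_idx in range(1, transient_window_end + 1):
--         if sample_diffs[rel_idx] != 0:
--             continue
--         if all(sample_diffs[j] == 0 for j in range(rel_idx, transient_window_end + 1)):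
--             return "transient"
--
--     if sample_diffs and all(diff == sample_diffs[0] for diff in sample_diffs):
--         return "persistent_offset"
--
--     abs_diffs = [abs(diff) for diff in sample_diffs]
--     nondecreasing = all(
--         abs_diffs[idx + 1] >= abs_diffs[idx] for idx in range(len(abs_diffs) - 1)
--     )
--     strict_increase = any(
--         abs_diffs[idx + 1] > abs_diffs[idx] for idx in range(len(abs_diffs) - 1)
--     )
--     if nondecreasing and strict_increase:
--         return "rate_divergence"
--     return None
-- ===== SOURCE B (Python) =====
-- def classify_sample_diffs(sample_diffs):
--     n = len(sample_diffs)
--     # Transient: the nested search succeeds iff the last in-window sample is zero.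
--     window_end = min(n - 1, 8)
--     if window_end >= 1 and sample_diffs[window_end] == 0:
--         return "transient"
--
--     if sample_diffs and all(diff == sample_diffs[0] for diff in sample_diffs):
--         return "persistent_offset"
--
--     # Single pass over abs values, tracking prev and a saw-increase flag.
--     prev = None
--     nondecreasing = True
--     saw_increase = False
--     for d in sample_diffs:
--         a = abs(d)
--         if prev is not None:
--             if a < prev:
--                 nondecreasing = False
--                 break
--             if a > prev:
--                 saw_increase = True
--         prev = a
--     if nondecreasing and saw_increase:
--         return "rate_divergence"
--     return None
-- ===== Notes on version B (the rewrite author's own statement) =====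
-- stated objective: faster
-- what changed: The nested transient search (loop + inner all-zero scan) is replaced by the closed-form test sample_diffs[min(len-1,8)] == 0, and the two separate index-range passes for nondecreasing/strict-increase are fused into one early-exiting pass over abs values tracking prev and a saw_increase flag.
import Mathlib
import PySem

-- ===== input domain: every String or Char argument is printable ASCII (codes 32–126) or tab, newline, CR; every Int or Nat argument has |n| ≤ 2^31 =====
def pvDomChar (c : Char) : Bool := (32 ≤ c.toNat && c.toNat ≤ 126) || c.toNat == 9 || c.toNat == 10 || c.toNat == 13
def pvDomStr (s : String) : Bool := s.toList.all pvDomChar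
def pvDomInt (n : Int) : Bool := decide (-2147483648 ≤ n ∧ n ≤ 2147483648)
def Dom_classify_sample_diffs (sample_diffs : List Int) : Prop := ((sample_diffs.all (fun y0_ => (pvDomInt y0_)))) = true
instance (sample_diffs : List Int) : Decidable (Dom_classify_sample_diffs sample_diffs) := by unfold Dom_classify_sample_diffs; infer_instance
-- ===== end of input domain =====

-- B replaces A's nested transient search by the closed-form test sample_diffs[min(len-1,8)] == 0
-- and fuses the two index-range passes (nondecreasing / strict increase) into one early-exiting
-- pass over absolute values: simpler, one traversal instead of three.


-- ===== PORT A =====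
-- inner generator 'all(sample_diffs[j] == 0 for j in range(rel_idx, transient_window_end + 1))';
-- every index A produces here is in range, so pyGetD (default 1) is exact on those indices.
def pvA_allZero (s : List Int) (wend rel : Int) : Bool :=
  (PySem.List.pyRange rel (wend + 1) 1).all (fun j => PySem.List.pyGetD s j 1 == 0)

-- the 'for rel_idx in range(1, transient_window_end + 1)' loop with its early return
def pvA_loop (s : List Int) (wend : Int) : List Int → Option String
  | [] => none
  | rel :: rest =>
    if PySem.List.pyGetD s rel 1 ≠ 0 then pvA_loop s wend rest
    else if pvA_allZero s wend rel then some "transient"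
    else pvA_loop s wend rest

-- 'all(abs_diffs[idx+1] >= abs_diffs[idx] for idx in range(len(abs_diffs)-1))' (indices in range)
def pvA_nondec (xs : List Int) : Bool :=
  (List.range (xs.length - 1)).all (fun i => decide (xs.getD i 0 ≤ xs.getD (i + 1) 0))

-- 'any(abs_diffs[idx+1] > abs_diffs[idx] for idx in range(len(abs_diffs)-1))'
def pvA_strict (xs : List Int) : Bool :=
  (List.range (xs.length - 1)).any (fun i => decide (xs.getD i 0 < xs.getD (i + 1) 0))

def classify_sample_diffs (sample_diffs : List Int) : Option String :=
  let wend := min ((sample_diffs.length : Int) - 1) 8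
  match pvA_loop sample_diffs wend (PySem.List.pyRange 1 (wend + 1) 1) with
  | some r => some r
  | none =>
    if (!sample_diffs.isEmpty)
        && sample_diffs.all (fun d => d == PySem.List.pyGetD sample_diffs 0 0) then
      some "persistent_offset"
    else
      let abs_diffs := sample_diffs.map (fun d => |d|)
      if pvA_nondec abs_diffs && pvA_strict abs_diffs then some "rate_divergence" else none

-- ===== PORT B =====
-- Source B's single pass: prev (None before the first element), break on decrease;
-- returns (nondecreasing, saw_increase).
def pvB_scan (prev : Option Int) (sawInc : Bool) : List Int → Bool × Bool
  | [] => (true, sawInc)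
  | d :: rest =>
    let a := |d|
    match prev with
    | none => pvB_scan (some a) sawInc rest
    | some p =>
      if a < p then (false, sawInc)
      else pvB_scan (some a) (sawInc || decide (p < a)) rest

def classify_sample_diffs_alt (sample_diffs : List Int) : Option String :=
  let wend := min ((sample_diffs.length : Int) - 1) 8
  if 1 ≤ wend ∧ PySem.List.pyGetD sample_diffs wend 1 = 0 then some "transient"
  else if (!sample_diffs.isEmpty)
      && sample_diffs.all (fun d => d == PySem.List.pyGetD sample_diffs 0 0) then
    some "persistent_offset"
  else
    let r := pvB_scan none false sample_diffs
    if r.1 && r.2 then some "rate_divergence" else none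

-- ===== PRECONDITION & SPEC =====
def Spec_classify_sample_diffs (sample_diffs : List Int) (out : Option String) : Prop := out = classify_sample_diffs_alt sample_diffs
instance (sample_diffs : List Int) (out : Option String) : Decidable (Spec_classify_sample_diffs sample_diffs out) := by unfold Spec_classify_sample_diffs; infer_instance

-- ===== CLAIM (what is proved, stated in full; the proofs are below) =====
def Claim_equal_classify_sample_diffs : Prop := ∀ (sample_diffs : List Int), Dom_classify_sample_diffs sample_diffs → Spec_classify_sample_diffs sample_diffs (classify_sample_diffs sample_diffs)

-- ===== LEMMAS AND PROOFS =====

-- adjacent-pair recursions used only by the proofs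
def ndA : List Int → Bool
  | [] => true
  | [_] => true
  | a :: b :: t => decide (a ≤ b) && ndA (b :: t)

def stA : List Int → Bool
  | [] => false
  | [_] => false
  | a :: b :: t => decide (a < b) || stA (b :: t)

lemma pvA_loop_spec (s : List Int) (wend : Int) (rs : List Int) :
    pvA_loop s wend rs =
      if rs.any (fun rel => (PySem.List.pyGetD s rel 1 == 0) && pvA_allZero s wend rel)
      then some "transient" else none := by
  induction rs with
  | nil => simp [pvA_loop]
  | cons rel rest ih =>
    by_cases h0 : PySem.List.pyGetD s rel 1 = 0
    · by_cases hz : pvA_allZero s wend rel = true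
      · simp [pvA_loop, h0, hz]
      · simp [pvA_loop, h0, hz, ih]
    · simp [pvA_loop, h0, ih]

lemma pvA_any_closed (s : List Int) (wend : Int) :
    (PySem.List.pyRange 1 (wend + 1) 1).any
        (fun rel => (PySem.List.pyGetD s rel 1 == 0) && pvA_allZero s wend rel)
      = decide (1 ≤ wend ∧ PySem.List.pyGetD s wend 1 = 0) := by
  cases hA : (PySem.List.pyRange 1 (wend + 1) 1).any
      (fun rel => (PySem.List.pyGetD s rel 1 == 0) && pvA_allZero s wend rel) with
  | false =>
    symm
    rw [decide_eq_false_iff_not]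
    rintro ⟨h1, h2⟩
    rw [List.any_eq_false] at hA
    have hmem : wend ∈ PySem.List.pyRange 1 (wend + 1) 1 := by
      rw [PySem.List.mem_pyRange_one]; omega
    have := hA wend hmem
    rw [pvA_allZero, PySem.List.pyRange_one_singleton] at this
    simp [h2] at this
  | true =>
    symm
    rw [decide_eq_true_eq]
    rw [List.any_eq_true] at hA
    obtain ⟨rel, hmem, hp⟩ := hA
    rw [PySem.List.mem_pyRange_one] at hmem
    rw [Bool.and_eq_true] at hp
    have hall := hp.2
    rw [pvA_allZero, List.all_eq_true] at hall
    have hw : wend ∈ PySem.List.pyRange rel (wend + 1) 1 := by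
      rw [PySem.List.mem_pyRange_one]; omega
    have := hall wend hw
    simp at this
    exact ⟨by omega, this⟩

lemma ndA_range (xs : List Int) : pvA_nondec xs = ndA xs := by
  induction xs with
  | nil => simp [pvA_nondec, ndA]
  | cons x xs ih =>
    cases xs with
    | nil => simp [pvA_nondec, ndA]
    | cons y t =>
      rw [pvA_nondec, ndA] at *
      simp only [List.length_cons, Nat.add_sub_cancel, List.range_succ_eq_map,
        List.all_cons, List.all_map] at *
      simp only [List.getD, List.getElem?_cons_zero, List.getElem?_cons_succ] at *
      rw [← ih]
      rfl

lemma stA_range (xs : List Int) : pvA_strict xs = stA xs := by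
  induction xs with
  | nil => simp [pvA_strict, stA]
  | cons x xs ih =>
    cases xs with
    | nil => simp [pvA_strict, stA]
    | cons y t =>
      rw [pvA_strict, stA] at *
      simp only [List.length_cons, Nat.add_sub_cancel, List.range_succ_eq_map,
        List.any_cons, List.any_map] at *
      simp only [List.getD, List.getElem?_cons_zero, List.getElem?_cons_succ] at *
      rw [← ih]
      rfl

lemma pvB_scan_spec (l : List Int) (p : Int) (s : Bool) :
    ((pvB_scan (some p) s l).1 && (pvB_scan (some p) s l).2)
      = (ndA (p :: l.map (fun d => |d|)) && (s || stA (p :: l.map (fun d => |d|)))) := by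
  induction l generalizing p s with
  | nil => simp [pvB_scan, ndA, stA]
  | cons d rest ih =>
    by_cases h : |d| < p
    · have hnp : ¬ (p ≤ |d|) := by omega
      simp [pvB_scan, h, ndA, hnp]
    · have hp : p ≤ |d| := by omega
      simp only [pvB_scan, List.map_cons, ndA, stA, if_neg h]
      rw [ih]
      simp [hp, Bool.or_assoc]

lemma pvB_divergence (l : List Int) :
    ((pvB_scan none false l).1 && (pvB_scan none false l).2)
      = (ndA (l.map (fun d => |d|)) && stA (l.map (fun d => |d|))) := by
  cases l with
  | nil => simp [pvB_scan, ndA, stA]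
  | cons d rest =>
    show ((pvB_scan (some |d|) false rest).1 && (pvB_scan (some |d|) false rest).2) = _
    rw [pvB_scan_spec]
    simp

-- ===== VERDICT (by name: the statement is the Claim_ definition above) =====
theorem classify_sample_diffs_spec : Claim_equal_classify_sample_diffs := by
  intro sd _
  show classify_sample_diffs sd = classify_sample_diffs_alt sd
  rw [classify_sample_diffs, classify_sample_diffs_alt]
  rw [pvA_loop_spec, pvA_any_closed]
  by_cases ht : 1 ≤ min ((sd.length : Int) - 1) 8 ∧
      PySem.List.pyGetD sd (min ((sd.length : Int) - 1) 8) 1 = 0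
  · simp [ht]
  · simp only [ht, decide_false, if_false]
    by_cases hpe : ((!sd.isEmpty)
        && sd.all (fun d => d == PySem.List.pyGetD sd 0 0)) = true
    · simp [hpe]
    · simp only [hpe, if_false, Bool.false_eq_true]
      rw [ndA_range, stA_range, ← pvB_divergence]
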